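-- pv_equiv track=rewrite | github.com/aditi1930/Assignments | email.py | extract_domain
-- ===== SOURCE A (Python) =====
-- def extract_domain(email_address):
--     flag = False
--     domain_name = ""
--
--     for i in range(len(email_address)):
--         if flag:
--             domain_name += email_address[i]
--         if email_address[i] == '@':
--             flag = True
--
--     return domain_name
-- ===== SOURCE B (Python) =====
-- def extract_domain(email_address):
--     return email_address.partition('@')[2]
-- ===== Notes on version B (the rewrite author's own statement) =====
-- stated objective: simpler
-- what changed: Replaces the per-character flag-and-accumulate loop with a single partition call, returning the substring after the first separator (empty if none).
import Mathlib
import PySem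

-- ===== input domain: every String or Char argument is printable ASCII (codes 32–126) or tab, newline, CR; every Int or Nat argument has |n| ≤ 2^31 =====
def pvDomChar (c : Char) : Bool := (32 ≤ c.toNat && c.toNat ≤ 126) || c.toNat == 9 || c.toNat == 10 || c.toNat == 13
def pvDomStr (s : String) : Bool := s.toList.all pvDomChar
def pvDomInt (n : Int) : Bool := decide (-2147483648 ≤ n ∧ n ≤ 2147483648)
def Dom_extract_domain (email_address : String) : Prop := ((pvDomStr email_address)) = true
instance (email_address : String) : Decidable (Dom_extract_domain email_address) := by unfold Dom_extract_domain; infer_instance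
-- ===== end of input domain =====

-- B replaces A's flag-and-accumulate character loop with str.partition('@')[2] (substring after the first '@'): simpler.


-- ===== PORT A =====
-- A's for-loop over the characters in order, carrying (flag, accumulated domain_name).
def extract_domain_loop : List Char → Bool → List Char → List Char
  | [], _, acc => acc
  | c :: cs, flag, acc =>
      extract_domain_loop cs (if c = '@' then true else flag)
        (if flag then acc ++ [c] else acc)

def extract_domain (email_address : String) : String :=
  String.mk (extract_domain_loop email_address.toList false [])

-- ===== PORT B =====
-- partition('@')[2]: the suffix after the first '@', or "" if there is no '@'.
def partition_after : List Char → List Char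
  | [] => []
  | c :: cs => if c = '@' then cs else partition_after cs

def extract_domain_alt (email_address : String) : String :=
  String.mk (partition_after email_address.toList)

-- ===== PRECONDITION & SPEC =====
def Spec_extract_domain (email_address : String) (out : String) : Prop := out = extract_domain_alt email_address
instance (email_address : String) (out : String) : Decidable (Spec_extract_domain email_address out) := by unfold Spec_extract_domain; infer_instance

-- ===== CLAIM (what is proved, stated in full; the proofs are below) =====
def Claim_equal_extract_domain : Prop := ∀ (email_address : String), Dom_extract_domain email_address → Spec_extract_domain email_address (extract_domain email_address)

-- ===== LEMMAS AND PROOFS =====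
-- Once the flag is true, the loop appends every remaining character.
theorem extract_domain_loop_true (cs : List Char) :
    ∀ acc, extract_domain_loop cs true acc = acc ++ cs := by
  induction cs with
  | nil => intro acc; simp [extract_domain_loop]
  | cons c cs ih =>
      intro acc
      simp [extract_domain_loop, ih]

theorem extract_domain_loop_eq_partition (cs : List Char) :
    extract_domain_loop cs false [] = partition_after cs := by
  induction cs with
  | nil => rfl
  | cons c cs ih =>
      by_cases h : c = '@'
      · simp [extract_domain_loop, partition_after, h, extract_domain_loop_true]
      · simp [extract_domain_loop, partition_after, h, ih]

-- ===== VERDICT (by name: the statement is the Claim_ definition above) =====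
theorem extract_domain_spec : Claim_equal_extract_domain := by
  intro s _
  unfold Spec_extract_domain extract_domain extract_domain_alt
  rw [extract_domain_loop_eq_partition]
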